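-- pv_equiv track=rewrite | github.com/grahamclyne/advent | 2016/advent2016_11.py | checkForConflicts
-- ===== SOURCE A (Python) =====
-- def checkForConflicts(floor):
--     for item in floor:
--         if(item[3:] == 'CHIP'):
--             if(item[:3] + 'GEN' not in floor):
--                 for item in floor:
--                     if('GEN' in item and item is not item[:3] + "GEN"):
--                         return False
--     return True
-- ===== SOURCE B (Python) =====
-- def checkForConflicts(floor):
--     # One aggregate pass: is any 'GEN'-containing item present at all?
--     if not any('GEN' in it for it in floor):
--         return True
--     # One flat pass: any chip whose matching generator is absent?
--     return not any(it[3:] == 'CHIP' and it[:3] + 'GEN' not in floor for it in floor)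
-- ===== Notes on version B (the rewrite author's own statement) =====
-- stated objective: simpler
-- what changed: A's nested outer-chip/inner-generator scan (whose inner identity test is always true) is replaced by one hoisted aggregate pass 'any item containing GEN?' with an early True, followed by a single flat pass over chips whose matching generator is missing.
import Mathlib
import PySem

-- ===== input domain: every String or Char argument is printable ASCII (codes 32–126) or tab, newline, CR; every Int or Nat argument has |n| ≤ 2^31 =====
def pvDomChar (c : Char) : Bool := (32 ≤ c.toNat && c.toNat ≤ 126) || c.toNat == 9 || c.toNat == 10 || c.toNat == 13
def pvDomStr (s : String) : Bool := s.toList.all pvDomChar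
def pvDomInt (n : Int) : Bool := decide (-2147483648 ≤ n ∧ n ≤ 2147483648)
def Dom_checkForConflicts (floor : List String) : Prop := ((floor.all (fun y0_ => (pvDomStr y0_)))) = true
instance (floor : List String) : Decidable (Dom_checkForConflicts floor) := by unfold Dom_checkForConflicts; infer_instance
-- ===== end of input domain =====

-- B replaces A's nested scans by one hoisted "any GEN-containing item?" pass plus one flat chip pass (objective: simpler).
-- Strings are handled as their code-point lists (exact via PySem.Chars).

-- ===== PORT A =====
-- inner loop of A: `for item in floor: if 'GEN' in item and item is not item[:3]+"GEN": return False`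
-- `item is not item[:3]+"GEN"` is an identity test against a freshly built string: always True in CPython, ported as `true`.
def cfcInner (fl : List (List Char)) : Bool :=
  fl.any (fun it => PySem.Chars.isIn "GEN".toList it && true)

-- outer loop of A
def cfcOuter (fl : List (List Char)) : List (List Char) → Bool
  | [] => true
  | item :: rest =>
    if PySem.Chars.slice item (some 3) none == "CHIP".toList then
      if !(fl.contains (PySem.Chars.slice item none (some 3) ++ "GEN".toList)) then
        if cfcInner fl then false else cfcOuter fl rest
      else cfcOuter fl rest
    else cfcOuter fl rest

def checkForConflicts (floor : List String) : Bool :=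
  let fl := floor.map String.toList
  cfcOuter fl fl

-- ===== PORT B =====
def checkForConflicts_alt (floor : List String) : Bool :=
  let fl := floor.map String.toList
  if !(fl.any (fun it => PySem.Chars.isIn "GEN".toList it)) then true
  else !(fl.any (fun it =>
    PySem.Chars.slice it (some 3) none == "CHIP".toList &&
    !(fl.contains (PySem.Chars.slice it none (some 3) ++ "GEN".toList))))

-- ===== PRECONDITION & SPEC =====
def Spec_checkForConflicts (floor : List String) (out : Bool) : Prop := out = checkForConflicts_alt floor
instance (floor : List String) (out : Bool) : Decidable (Spec_checkForConflicts floor out) := by unfold Spec_checkForConflicts; infer_instance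

-- ===== CLAIM (what is proved, stated in full; the proofs are below) =====
def Claim_equal_checkForConflicts : Prop := ∀ (floor : List String), Dom_checkForConflicts floor → Spec_checkForConflicts floor (checkForConflicts floor)

-- ===== LEMMAS AND PROOFS =====

-- With no GEN-containing item, A's inner loop never fires and the outer loop returns true.
theorem cfcOuter_of_inner_false (fl : List (List Char)) (h : cfcInner fl = false) :
    ∀ l, cfcOuter fl l = true := by
  intro l
  induction l with
  | nil => rfl
  | cons item rest ih => simp [cfcOuter, h, ih]

-- With some GEN-containing item, A returns false exactly when some chip's generator is absent.
theorem cfcOuter_of_inner_true (fl : List (List Char)) (h : cfcInner fl = true) :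
    ∀ l, cfcOuter fl l =
      !(l.any (fun it =>
        PySem.Chars.slice it (some 3) none == "CHIP".toList &&
        !(fl.contains (PySem.Chars.slice it none (some 3) ++ "GEN".toList)))) := by
  intro l
  induction l with
  | nil => rfl
  | cons item rest ih =>
      simp only [cfcOuter, List.any_cons, h]
      split_ifs with h1 h2 <;> simp_all

-- ===== VERDICT (by name: the statement is the Claim_ definition above) =====
theorem checkForConflicts_spec : Claim_equal_checkForConflicts := by
  intro floor _
  unfold Spec_checkForConflicts checkForConflicts checkForConflicts_alt
  set fl := floor.map String.toList with hfl
  by_cases h : cfcInner fl = true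
  · have h' : fl.any (fun it => PySem.Chars.isIn "GEN".toList it) = true := by
      simpa [cfcInner] using h
    simp only [h', Bool.not_true, cfcOuter_of_inner_true fl h]
    simp
  · have h0 : cfcInner fl = false := by simpa using h
    have h' : fl.any (fun it => PySem.Chars.isIn "GEN".toList it) = false := by
      simpa [cfcInner] using h0
    rw [cfcOuter_of_inner_false fl h0]; simp only [h', Bool.not_false, if_pos]
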